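-- pv_equiv track=rewrite | github.com/marina-sp/reinform | src/Data.py | get_vocab_sets
-- ===== SOURCE A (Python) =====
-- def get_vocab_sets(raw_triple_by_split):
--     """
--     Get dataset-specific splits of entities, relevant for induction setting.
--     Gather entities and relations from different splits:
--         base = {train, valid}
--         test = {test, aux} ; note: test is a subset of aux
--     :param raw_triple_by_split: {split_name: nested list} with raw triples in s,p,o form
--     :return: sets of base, emerging (test) entities and of relations (as strings)
--     """
--     base_ents, test_ents, rels = set(), set(), set()
--     for data_split, data in raw_triple_by_split.items():
--         if data_split == "test":
--             continue
--
--         for triple in data: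
--             # collect all relations together
--             rels.add(triple[1])
--
--             # split entities by base/emerging
--             so = {triple[0], triple[2]}
--             if data_split in ["train", "valid"]:
--                 base_ents.update(so)
--             elif data_split == "aux":
--                 test_ents.update(so)
--
--     return base_ents, test_ents, rels
-- ===== SOURCE B (Python) =====
-- def get_vocab_sets(raw_triple_by_split):
--     # Three independent single-purpose passes instead of one branching loop.
--     rels = {triple[1]
--             for name, triples in raw_triple_by_split.items() if name != "test"
--             for triple in triples}
--     base_ents = {ent
--                  for name, triples in raw_triple_by_split.items()
--                  if name in ("train", "valid")
--                  for triple in triples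
--                  for ent in (triple[0], triple[2])}
--     test_ents = {ent
--                  for name, triples in raw_triple_by_split.items()
--                  if name == "aux"
--                  for triple in triples
--                  for ent in (triple[0], triple[2])}
--     return base_ents, test_ents, rels
-- ===== Notes on version B (the rewrite author's own statement) =====
-- stated objective: simpler
-- what changed: Replaces A's single loop that threads three set accumulators through a chain of split-name branches with three independent, single-purpose set comprehensions (one per result set), each scanning only for its own condition.
import Mathlib
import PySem

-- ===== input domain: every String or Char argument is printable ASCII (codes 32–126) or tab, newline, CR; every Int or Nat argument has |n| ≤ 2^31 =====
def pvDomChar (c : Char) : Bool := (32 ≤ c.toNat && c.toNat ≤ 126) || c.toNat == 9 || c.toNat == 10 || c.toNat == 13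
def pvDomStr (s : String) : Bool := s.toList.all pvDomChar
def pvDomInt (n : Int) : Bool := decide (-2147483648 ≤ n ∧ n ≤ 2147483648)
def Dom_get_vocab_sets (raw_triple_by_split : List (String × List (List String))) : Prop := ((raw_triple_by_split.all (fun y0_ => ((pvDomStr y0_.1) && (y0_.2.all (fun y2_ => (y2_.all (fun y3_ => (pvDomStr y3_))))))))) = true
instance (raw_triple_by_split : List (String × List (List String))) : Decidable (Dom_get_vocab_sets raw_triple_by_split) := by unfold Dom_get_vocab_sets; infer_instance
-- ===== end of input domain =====

-- B replaces A's single triple-accumulator branching loop by three independent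
-- single-purpose passes (one per result set); same cost, simpler decomposition.

-- ===== PORT A =====
-- one fold over the dict items, threading the state (base_ents, test_ents, rels);
-- triple indexing via pyGet? (the total default branch is only reached outside Pre_)
def get_vocab_sets (raw_triple_by_split : List (String × List (List String))) : List String × List String × List String :=
  raw_triple_by_split.foldl
    (fun (acc : List String × List String × List String) p =>
      if p.1 == "test" then acc
      else
        p.2.foldl
          (fun acc triple =>
            let rels := PySem.Set.add acc.2.2 ((PySem.List.pyGet? triple 1).getD "")
            let so := PySem.Set.add (PySem.Set.add PySem.Set.empty ((PySem.List.pyGet? triple 0).getD "")) ((PySem.List.pyGet? triple 2).getD "")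
            if ["train", "valid"].contains p.1 then
              (PySem.Set.update acc.1 so, acc.2.1, rels)
            else if p.1 == "aux" then
              (acc.1, PySem.Set.update acc.2.1 so, rels)
            else
              (acc.1, acc.2.1, rels))
          acc)
    (PySem.Set.empty, PySem.Set.empty, PySem.Set.empty)

-- ===== PORT B =====
-- three independent passes, each building one set
def get_vocab_sets_alt (raw_triple_by_split : List (String × List (List String))) : List String × List String × List String :=
  let rels := raw_triple_by_split.foldl
    (fun (s : List String) p =>
      if p.1 != "test" then
        p.2.foldl (fun s triple => PySem.Set.add s ((PySem.List.pyGet? triple 1).getD "")) s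
      else s)
    PySem.Set.empty
  let base_ents := raw_triple_by_split.foldl
    (fun (s : List String) p =>
      if p.1 == "train" || p.1 == "valid" then
        p.2.foldl
          (fun s triple =>
            PySem.Set.add (PySem.Set.add s ((PySem.List.pyGet? triple 0).getD "")) ((PySem.List.pyGet? triple 2).getD ""))
          s
      else s)
    PySem.Set.empty
  let test_ents := raw_triple_by_split.foldl
    (fun (s : List String) p =>
      if p.1 == "aux" then
        p.2.foldl
          (fun s triple =>
            PySem.Set.add (PySem.Set.add s ((PySem.List.pyGet? triple 0).getD "")) ((PySem.List.pyGet? triple 2).getD ""))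
          s
      else s)
    PySem.Set.empty
  (base_ents, test_ents, rels)

-- ===== PRECONDITION & SPEC =====
-- A raises IndexError on triple[0]/[1]/[2] for any triple of length < 3 in a
-- split whose name is not "test"; exactly those inputs are excluded.
def Pre_get_vocab_sets (raw_triple_by_split : List (String × List (List String))) : Prop :=
  ∀ p ∈ raw_triple_by_split, p.1 ≠ "test" → ∀ t ∈ p.2, 3 ≤ t.length
instance (raw_triple_by_split : List (String × List (List String))) : Decidable (Pre_get_vocab_sets raw_triple_by_split) := by unfold Pre_get_vocab_sets; infer_instance
def pvWitness_get_vocab_sets : (List (String × List (List String))) :=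
  [("train", [["a", "r", "b"]]), ("aux", [["c", "r", "a"]]), ("test", [["x"]])]
def Spec_get_vocab_sets (raw_triple_by_split : List (String × List (List String))) (out : List String × List String × List String) : Prop := out = get_vocab_sets_alt raw_triple_by_split
instance (raw_triple_by_split : List (String × List (List String))) (out : List String × List String × List String) : Decidable (Spec_get_vocab_sets raw_triple_by_split out) := by unfold Spec_get_vocab_sets; infer_instance

-- ===== CLAIM (what is proved, stated in full; the proofs are below) =====
def Claim_equal_get_vocab_sets : Prop := ∀ (raw_triple_by_split : List (String × List (List String))), Dom_get_vocab_sets raw_triple_by_split → Pre_get_vocab_sets raw_triple_by_split → Spec_get_vocab_sets raw_triple_by_split (get_vocab_sets raw_triple_by_split)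

-- ===== LEMMAS AND PROOFS =====

-- updating a set with the two-element set literal {x, y} = adding x then y
theorem update_pair_set (s : List String) (x y : String) :
    PySem.Set.update s (PySem.Set.add (PySem.Set.add PySem.Set.empty x) y)
      = PySem.Set.add (PySem.Set.add s x) y := by
  by_cases h : y = x
  · subst h
    have hso : PySem.Set.add (PySem.Set.add PySem.Set.empty y) y = [y] := by
      simp [PySem.Set.add_eq_ite, PySem.Set.empty]
    have hs : PySem.Set.add (PySem.Set.add s y) y = PySem.Set.add s y :=
      PySem.Set.add_of_mem (by simp [PySem.Set.mem_add])
    rw [hso, hs]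
    simp [PySem.Set.update, List.foldl]
  · have hso : PySem.Set.add (PySem.Set.add PySem.Set.empty x) y = [x, y] := by
      simp [PySem.Set.add_eq_ite, PySem.Set.empty, h]
    rw [hso]
    simp [PySem.Set.update, List.foldl]

-- the inner loop of A over a "train"/"valid" split splits into the two
-- single-purpose inner loops of B (entities and relations)
theorem inner_split_base (l : List (List String)) (b t r : List String) :
    l.foldl
      (fun (acc : List String × List String × List String) triple =>
        (PySem.Set.add (PySem.Set.add acc.1 ((PySem.List.pyGet? triple 0).getD "")) ((PySem.List.pyGet? triple 2).getD ""),
         acc.2.1,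
         PySem.Set.add acc.2.2 ((PySem.List.pyGet? triple 1).getD "")))
      (b, t, r)
    = (l.foldl (fun s triple => PySem.Set.add (PySem.Set.add s ((PySem.List.pyGet? triple 0).getD "")) ((PySem.List.pyGet? triple 2).getD "")) b,
       t,
       l.foldl (fun s triple => PySem.Set.add s ((PySem.List.pyGet? triple 1).getD "")) r) := by
  induction l generalizing b t r with
  | nil => rfl
  | cons a l ih => simp only [List.foldl_cons]; exact ih _ _ _

-- same for an "aux" split
theorem inner_split_aux (l : List (List String)) (b t r : List String) :
    l.foldl
      (fun (acc : List String × List String × List String) triple =>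
        (acc.1,
         PySem.Set.add (PySem.Set.add acc.2.1 ((PySem.List.pyGet? triple 0).getD "")) ((PySem.List.pyGet? triple 2).getD ""),
         PySem.Set.add acc.2.2 ((PySem.List.pyGet? triple 1).getD "")))
      (b, t, r)
    = (b,
       l.foldl (fun s triple => PySem.Set.add (PySem.Set.add s ((PySem.List.pyGet? triple 0).getD "")) ((PySem.List.pyGet? triple 2).getD "")) t,
       l.foldl (fun s triple => PySem.Set.add s ((PySem.List.pyGet? triple 1).getD "")) r) := by
  induction l generalizing b t r with
  | nil => rfl
  | cons a l ih => simp only [List.foldl_cons]; exact ih _ _ _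

-- same for any other non-"test" split (only relations are collected)
theorem inner_split_other (l : List (List String)) (b t r : List String) :
    l.foldl
      (fun (acc : List String × List String × List String) triple =>
        (acc.1, acc.2.1, PySem.Set.add acc.2.2 ((PySem.List.pyGet? triple 1).getD "")))
      (b, t, r)
    = (b, t, l.foldl (fun s triple => PySem.Set.add s ((PySem.List.pyGet? triple 1).getD "")) r) := by
  induction l generalizing b t r with
  | nil => rfl
  | cons a l ih => simp only [List.foldl_cons]; exact ih _ _ _

theorem main_invariant (d : List (String × List (List String)))
    (b t r : List String) :
    d.foldl
      (fun (acc : List String × List String × List String) p =>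
        if p.1 == "test" then acc
        else
          p.2.foldl
            (fun acc triple =>
              let rels := PySem.Set.add acc.2.2 ((PySem.List.pyGet? triple 1).getD "")
              let so := PySem.Set.add (PySem.Set.add PySem.Set.empty ((PySem.List.pyGet? triple 0).getD "")) ((PySem.List.pyGet? triple 2).getD "")
              if ["train", "valid"].contains p.1 then
                (PySem.Set.update acc.1 so, acc.2.1, rels)
              else if p.1 == "aux" then
                (acc.1, PySem.Set.update acc.2.1 so, rels)
              else
                (acc.1, acc.2.1, rels))
            acc)
      (b, t, r)
    = (d.foldl
        (fun (s : List String) p =>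
          if p.1 == "train" || p.1 == "valid" then
            p.2.foldl
              (fun s triple =>
                PySem.Set.add (PySem.Set.add s ((PySem.List.pyGet? triple 0).getD "")) ((PySem.List.pyGet? triple 2).getD ""))
              s
          else s) b,
       d.foldl
        (fun (s : List String) p =>
          if p.1 == "aux" then
            p.2.foldl
              (fun s triple =>
                PySem.Set.add (PySem.Set.add s ((PySem.List.pyGet? triple 0).getD "")) ((PySem.List.pyGet? triple 2).getD ""))
              s
          else s) t,
       d.foldl
        (fun (s : List String) p =>
          if p.1 != "test" then
            p.2.foldl (fun s triple => PySem.Set.add s ((PySem.List.pyGet? triple 1).getD "")) s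
          else s) r) := by
  induction d generalizing b t r with
  | nil => rfl
  | cons p d ih =>
    simp only [List.foldl_cons]
    by_cases htest : p.1 = "test"
    · have h1 : (p.1 == "test") = true := by simp [htest]
      have h3 : (p.1 == "train" || p.1 == "valid") = false := by simp [htest]
      have h4 : (p.1 != "test") = false := by simp [htest]
      have h5 : (p.1 == "aux") = false := by simp [htest]
      simp only [h1, h3, h4, h5, if_true, if_false, Bool.false_eq_true]
      exact ih b t r
    · by_cases hbase : p.1 = "train" ∨ p.1 = "valid"
      · have h1 : (p.1 == "test") = false := by simp [htest]
        have h2 : (["train", "valid"].contains p.1) = true := by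
          rcases hbase with h | h <;> simp [h]
        have h3 : (p.1 == "train" || p.1 == "valid") = true := by
          rcases hbase with h | h <;> simp [h]
        have h4 : (p.1 != "test") = true := by simp [htest]
        have h5 : (p.1 == "aux") = false := by
          rcases hbase with h | h <;> simp [h]
        simp only [h1, h2, h3, h4, h5, if_true, if_false, Bool.false_eq_true]
        rw [show (fun (acc : List String × List String × List String) triple =>
              let rels := PySem.Set.add acc.2.2 ((PySem.List.pyGet? triple 1).getD "")
              let so := PySem.Set.add (PySem.Set.add PySem.Set.empty ((PySem.List.pyGet? triple 0).getD "")) ((PySem.List.pyGet? triple 2).getD "")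
              (PySem.Set.update acc.1 so, acc.2.1, rels))
            = fun (acc : List String × List String × List String) triple =>
              (PySem.Set.add (PySem.Set.add acc.1 ((PySem.List.pyGet? triple 0).getD "")) ((PySem.List.pyGet? triple 2).getD ""),
               acc.2.1,
               PySem.Set.add acc.2.2 ((PySem.List.pyGet? triple 1).getD ""))
          from funext fun acc => funext fun triple => by
            simp only [update_pair_set]]
        rw [inner_split_base]
        exact ih _ _ _
      · push_neg at hbase
        by_cases haux : p.1 = "aux"
        · have h1 : (p.1 == "test") = false := by simp [htest]
          have h2 : (["train", "valid"].contains p.1) = false := by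
            simp [hbase.1, hbase.2]
          have h3 : (p.1 == "train" || p.1 == "valid") = false := by
            simp [hbase.1, hbase.2]
          have h4 : (p.1 != "test") = true := by simp [htest]
          have h5 : (p.1 == "aux") = true := by simp [haux]
          simp only [h1, h2, h3, h4, h5, if_true, if_false, Bool.false_eq_true]
          rw [show (fun (acc : List String × List String × List String) triple =>
                let rels := PySem.Set.add acc.2.2 ((PySem.List.pyGet? triple 1).getD "")
                let so := PySem.Set.add (PySem.Set.add PySem.Set.empty ((PySem.List.pyGet? triple 0).getD "")) ((PySem.List.pyGet? triple 2).getD "")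
                (acc.1, PySem.Set.update acc.2.1 so, rels))
              = fun (acc : List String × List String × List String) triple =>
                (acc.1,
                 PySem.Set.add (PySem.Set.add acc.2.1 ((PySem.List.pyGet? triple 0).getD "")) ((PySem.List.pyGet? triple 2).getD ""),
                 PySem.Set.add acc.2.2 ((PySem.List.pyGet? triple 1).getD ""))
            from funext fun acc => funext fun triple => by
              simp only [update_pair_set]]
          rw [inner_split_aux]
          exact ih _ _ _
        · have h1 : (p.1 == "test") = false := by simp [htest]
          have h2 : (["train", "valid"].contains p.1) = false := by
            simp [hbase.1, hbase.2]
          have h3 : (p.1 == "train" || p.1 == "valid") = false := by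
            simp [hbase.1, hbase.2]
          have h4 : (p.1 != "test") = true := by simp [htest]
          have h5 : (p.1 == "aux") = false := by simp [haux]
          simp only [h1, h2, h3, h4, h5, if_true, if_false, Bool.false_eq_true]
          rw [inner_split_other]
          exact ih _ _ _

-- ===== VERDICT (by name: the statement is the Claim_ definition above) =====
theorem get_vocab_sets_spec : Claim_equal_get_vocab_sets := by
  intro d _ _
  unfold Spec_get_vocab_sets get_vocab_sets get_vocab_sets_alt
  exact main_invariant d PySem.Set.empty PySem.Set.empty PySem.Set.empty
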